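-- pv_equiv track=rewrite | github.com/josecatela/sgcodewars | day41/day41.py | Jens_day41
-- ===== SOURCE A (Python) =====
-- def Jens_day41(apples):
--     selected_apples = []
--     for i in range(len(apples)):
--         if apples[i] == [0, 0]:
--             continue
--         elif apples[i].count(0) == 1:
--             if i < len(apples)-1:
--                 for n in range(i+1, len(apples)):
--                     if apples[n].count(0) == 1:
--                         if apples[i][0] == 0:
--                             apples[i][0] = apples[i][1]
--                         apples[i][1] = apples[n][0] if apples[n][1] == 0 else apples[n][1]
--                         apples[n] = [0, 0]
--                         selected_apples.append(apples[i])
--                         break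
--         else:
--             selected_apples.append(apples[i])
--     return selected_apples
-- ===== SOURCE B (Python) =====
-- def _merge(p, x):
--     # combine an earlier single-zero list p with its partner single-zero list x
--     r = list(p)
--     if r[0] == 0:
--         r[0] = r[1]
--     r[1] = x[0] if x[1] == 0 else x[1]
--     return r
--
--
-- def Jens_day41(apples):
--     # Single pass: full pairs are appended as they come; a single-zero list
--     # reserves a slot in the output, filled when the next single-zero arrives.
--     out = []
--     pending = None  # (reserved slot index, the waiting single-zero list)
--     for x in apples:
--         if x.count(0) == 1:
--             if pending is None:
--                 pending = (len(out), x)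
--                 out.append(None)  # reserved slot
--             else:
--                 idx, p = pending
--                 out[idx] = _merge(p, x)
--                 pending = None
--         elif x != [0, 0]:
--             out.append(x)
--     if pending is not None:
--         out.pop(pending[0])
--     return out
-- ===== Notes on version B (the rewrite author's own statement) =====
-- stated objective: alternative
-- what changed: A rescans the tail of the (mutated) array for a partner at every single-zero element and marks consumed partners [0,0]; B makes one non-mutating pass keeping a single pending single-zero and a reserved output slot that is filled when the partner arrives (or dropped at the end), so the inner scan and the in-place marking disappear.
import Mathlib
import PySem

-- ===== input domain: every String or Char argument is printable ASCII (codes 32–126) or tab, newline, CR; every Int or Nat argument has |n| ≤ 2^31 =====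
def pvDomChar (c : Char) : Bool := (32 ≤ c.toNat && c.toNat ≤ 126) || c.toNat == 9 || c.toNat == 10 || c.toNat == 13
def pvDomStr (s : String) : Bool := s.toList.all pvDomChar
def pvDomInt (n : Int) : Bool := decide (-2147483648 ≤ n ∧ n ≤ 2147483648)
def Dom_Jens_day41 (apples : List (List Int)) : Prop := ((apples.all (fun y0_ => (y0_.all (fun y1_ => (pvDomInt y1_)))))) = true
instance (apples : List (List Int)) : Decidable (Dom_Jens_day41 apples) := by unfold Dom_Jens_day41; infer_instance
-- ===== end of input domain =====

-- B replaces A's index-based pairing (rescan of the mutated array's tail for a partner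
-- at each single-zero element) by a single pass that keeps one pending single-zero list
-- and a reserved output slot filled when the partner arrives (objective: alternative).
-- A mutates its argument in place; B does not — the claim is about the return value only.

-- ===== PORT A =====
-- inner loop `for n in range(i+1, len(apples)): if apples[n].count(0)==1: … break`:
-- scan the index list for the first single-zero entry.
-- All element accesses apples[i]/apples[n] have 0 ≤ index < length, so they are
-- ported with getD; the inner accesses apples[i][0], apples[i][1], apples[n][0],
-- apples[n][1] raise IndexError in Python exactly on the inputs Pre_ excludes,
-- and are ported with getD as well (exact inside Pre_).
def pvFindSZ (ap : List (List Int)) : List Nat → Option Nat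
  | [] => none
  | n :: ns => if (ap.getD n []).count 0 = 1 then some n else pvFindSZ ap ns

-- the outer `for i in range(len(apples))` over the (mutated) array ap
def pvOuterA (ap sel : List (List Int)) : List Nat → List (List Int)
  | [] => sel
  | i :: is =>
    let ai := ap.getD i []
    if ai = [0, 0] then pvOuterA ap sel is
    else if ai.count 0 = 1 then
      if i < ap.length - 1 then
        match pvFindSZ ap (List.range' (i + 1) (ap.length - (i + 1))) with
        | none => pvOuterA ap sel is
        | some n =>
          let an := ap.getD n []
          let ai1 := if ai.getD 0 0 = 0 then ai.set 0 (ai.getD 1 0) else ai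
          let ai2 := ai1.set 1 (if an.getD 1 0 = 0 then an.getD 0 0 else an.getD 1 0)
          pvOuterA ((ap.set i ai2).set n [0, 0]) (sel ++ [ai2]) is
      else pvOuterA ap sel is
    else pvOuterA ap (sel ++ [ai]) is

def Jens_day41 (apples : List (List Int)) : List (List Int) :=
  pvOuterA apples [] (List.range apples.length)

-- ===== PORT B =====
-- Source B's _merge (the r[0]/r[1]/x[0]/x[1] accesses are exact inside Pre_)
def pvMergeB (p x : List Int) : List Int :=
  let r := if p.getD 0 0 = 0 then p.set 0 (p.getD 1 0) else p
  r.set 1 (if x.getD 1 0 = 0 then x.getD 0 0 else x.getD 1 0)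

-- one step of Source B's loop; state = (out, pending); the `None` placeholder in the
-- reserved slot is ported as [] (it is always overwritten or popped)
def pvStepB (st : List (List Int) × Option (Nat × List Int)) (x : List Int) :
    List (List Int) × Option (Nat × List Int) :=
  match st with
  | (out, pending) =>
    if x.count 0 = 1 then
      match pending with
      | none => (out ++ [[]], some (out.length, x))
      | some (idx, p) => (out.set idx (pvMergeB p x), none)
    else if x = [0, 0] then (out, pending)
    else (out ++ [x], pending)

def Jens_day41_alt (apples : List (List Int)) : List (List Int) :=
  match apples.foldl pvStepB ([], none) with
  | (out, none) => out
  | (out, some (idx, _)) => out.eraseIdx idx   -- out.pop(idx): idx is always in range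

-- ===== PRECONDITION & SPEC =====
-- Pre_ excludes exactly the inputs on which Python A raises IndexError: those where
-- the list [0] (a single-zero list too short for the [1] accesses) occurs among the
-- single-zero lists that get paired, i.e. among the first 2*(k/2) of the k single-zero lists.
def Pre_Jens_day41 (apples : List (List Int)) : Prop :=
  [0] ∉ (apples.filter (fun l => l.count 0 == 1)).take
          (2 * ((apples.filter (fun l => l.count 0 == 1)).length / 2))
instance (apples : List (List Int)) : Decidable (Pre_Jens_day41 apples) := by
  unfold Pre_Jens_day41; infer_instance

def pvWitness_Jens_day41 : List (List Int) := [[1, 0], [2, 3], [0, 4], [0, 0], [5, 0]]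

def Spec_Jens_day41 (apples : List (List Int)) (out : List (List Int)) : Prop := out = Jens_day41_alt apples
instance (apples : List (List Int)) (out : List (List Int)) : Decidable (Spec_Jens_day41 apples out) := by unfold Spec_Jens_day41; infer_instance

-- ===== CLAIM (what is proved, stated in full; the proofs are below) =====
def Claim_equal_Jens_day41 : Prop := ∀ (apples : List (List Int)), Dom_Jens_day41 apples → Pre_Jens_day41 apples → Spec_Jens_day41 apples (Jens_day41 apples)

-- ===== LEMMAS AND PROOFS =====

-- split a list at its first single-zero element
def pvSplitSZ : List (List Int) → Option (List (List Int) × List Int × List (List Int))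
  | [] => none
  | y :: ys =>
    if y.count 0 = 1 then some ([], y, ys)
    else (pvSplitSZ ys).map (fun t => (y :: t.1, t.2.1, t.2.2))

theorem pvSplitSZ_eq {xs : List (List Int)} {pre y post}
    (h : pvSplitSZ xs = some (pre, y, post)) :
    xs = pre ++ y :: post ∧ (∀ z ∈ pre, z.count 0 ≠ 1) ∧ y.count 0 = 1 := by
  induction xs generalizing pre with
  | nil => simp [pvSplitSZ] at h
  | cons a as ih =>
    by_cases hc : a.count 0 = 1
    · simp only [pvSplitSZ, if_pos hc] at h
      cases h
      exact ⟨by simp, by simp, hc⟩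
    · simp only [pvSplitSZ, if_neg hc] at h
      cases hs : pvSplitSZ as with
      | none => simp [hs] at h
      | some t =>
        obtain ⟨p', y', q'⟩ := t
        simp only [hs, Option.map_some] at h
        cases h
        obtain ⟨h1, h2, h3⟩ := ih hs
        refine ⟨by simp [h1], ?_, h3⟩
        intro z hz
        rcases List.mem_cons.mp hz with rfl | hz
        · exact hc
        · exact h2 z hz

theorem pvSplitSZ_none {xs : List (List Int)} (h : pvSplitSZ xs = none) :
    ∀ z ∈ xs, z.count 0 ≠ 1 := by
  induction xs with
  | nil => simp
  | cons a as ih =>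
    by_cases hc : a.count 0 = 1
    · simp [pvSplitSZ, if_pos hc] at h
    · simp only [pvSplitSZ, if_neg hc] at h
      intro z hz
      rcases List.mem_cons.mp hz with rfl | hz
      · exact hc
      · exact ih (by cases hs : pvSplitSZ as <;> simp [hs] at h ⊢) z hz

theorem pvSplitSZ_post_lt {xs : List (List Int)} {pre y post}
    (h : pvSplitSZ xs = some (pre, y, post)) : post.length < xs.length := by
  have := (pvSplitSZ_eq h).1
  subst this
  simp
  omega

-- reference function both ports are proved equal to
def pvSpec : List (List Int) → List (List Int)
  | [] => []
  | x :: xs =>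
    if x = [0, 0] then pvSpec xs
    else if x.count 0 = 1 then
      match hs : pvSplitSZ xs with
      | none => pvSpec xs
      | some (pre, y, post) =>
        pvMergeB x y :: (pre.filter (fun l => l != [0, 0]) ++ pvSpec post)
    else x :: pvSpec xs
termination_by xs => xs.length
decreasing_by
  all_goals first
    | (have := pvSplitSZ_post_lt hs; simp <;> omega)
    | (simp <;> omega)

-- a block with no single-zero element contributes its non-[0,0] elements verbatim
theorem pvSpec_noSZ {pre : List (List Int)} (hp : ∀ z ∈ pre, z.count 0 ≠ 1)
    (post : List (List Int)) :
    pvSpec (pre ++ [0, 0] :: post) = pre.filter (fun l => l != [0, 0]) ++ pvSpec post := by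
  induction pre with
  | nil => simp [pvSpec]
  | cons a as ih =>
    have ha : a.count 0 ≠ 1 := hp a (by simp)
    by_cases h00 : a = [0, 0]
    · subst h00
      simp only [List.cons_append, pvSpec]
      rw [ih (fun z hz => hp z (by simp [hz]))]
      simp
    · simp only [List.cons_append, pvSpec, if_neg h00, if_neg ha]
      rw [ih (fun z hz => hp z (by simp [hz]))]
      simp [h00]

theorem pvSpec_noSZ_all {xs : List (List Int)} (hp : ∀ z ∈ xs, z.count 0 ≠ 1) :
    pvSpec xs = xs.filter (fun l => l != [0, 0]) := by
  induction xs with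
  | nil => simp [pvSpec]
  | cons a as ih =>
    have ha : a.count 0 ≠ 1 := hp a (by simp)
    by_cases h00 : a = [0, 0]
    · subst h00
      simp only [pvSpec]
      rw [ih (fun z hz => hp z (by simp [hz]))]
      simp
    · simp only [pvSpec, if_neg h00, if_neg ha]
      rw [ih (fun z hz => hp z (by simp [hz]))]
      simp [h00]

-- branch-wise unfolding of pvSpec (kept as rw lemmas so simp cannot fold the cons back)
theorem pvSpec_cons_00 (xs : List (List Int)) : pvSpec ([0, 0] :: xs) = pvSpec xs := by
  simp [pvSpec]

theorem pvSpec_cons_sz_none {x : List Int} {xs : List (List Int)}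
    (h00 : ¬ x = [0, 0]) (hsz : x.count 0 = 1) (hs : pvSplitSZ xs = none) :
    pvSpec (x :: xs) = pvSpec xs := by
  conv_lhs => rw [pvSpec.eq_def]
  simp only [if_neg h00, if_pos hsz]
  split
  · rfl
  · next heq => rw [hs] at heq; simp at heq

theorem pvSpec_cons_sz_some {x y : List Int} {xs pre post : List (List Int)}
    (h00 : ¬ x = [0, 0]) (hsz : x.count 0 = 1) (hs : pvSplitSZ xs = some (pre, y, post)) :
    pvSpec (x :: xs) = pvMergeB x y :: (pre.filter (fun l => l != [0, 0]) ++ pvSpec post) := by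
  conv_lhs => rw [pvSpec.eq_def]
  simp only [if_neg h00, if_pos hsz]
  split
  · next heq => rw [hs] at heq; simp at heq
  · next pre' y' post' heq =>
      rw [hs] at heq
      injection heq with h
      cases h
      rfl

theorem pvSpec_cons_other {x : List Int} {xs : List (List Int)}
    (h00 : ¬ x = [0, 0]) (hsz : ¬ x.count 0 = 1) : pvSpec (x :: xs) = x :: pvSpec xs := by
  conv_lhs => rw [pvSpec.eq_def]
  simp only [if_neg h00, if_neg hsz]

-- ===== A = pvSpec =====

theorem pvFindSZ_of_split (ap : List (List Int)) (j : Nat) :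
    (pvSplitSZ (ap.drop j) = none → pvFindSZ ap (List.range' j (ap.length - j)) = none) ∧
    (∀ pre y post, pvSplitSZ (ap.drop j) = some (pre, y, post) →
      pvFindSZ ap (List.range' j (ap.length - j)) = some (j + pre.length)) := by
  induction hN : ap.length - j using Nat.strong_induction_on generalizing j with
  | _ N ih =>
    subst hN
    by_cases hj : j < ap.length
    · have hdrop : ap.drop j = ap[j] :: ap.drop (j + 1) := List.drop_eq_getElem_cons hj
      have hget : ap.getD j [] = ap[j] := List.getD_eq_getElem ap [] hj
      have hget2 : ap[j]? = some ap[j] := List.getElem?_eq_getElem hj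
      have hrange : List.range' j (ap.length - j) = j :: List.range' (j + 1) (ap.length - (j + 1)) := by
        have : ap.length - j = (ap.length - (j + 1)) + 1 := by omega
        rw [this, List.range'_succ]
      constructor
      · intro hnone
        rw [hdrop] at hnone
        simp only [pvSplitSZ] at hnone
        split at hnone
        · simp at hnone
        · rw [hrange]
          simp only [pvFindSZ, hget, if_neg ‹¬ ap[j].count 0 = 1›]
          have hnone' : pvSplitSZ (ap.drop (j + 1)) = none := by
            cases hs : pvSplitSZ (ap.drop (j + 1)) <;> simp [hs] at hnone ⊢
          exact (ih (ap.length - (j + 1)) (by omega) (j + 1) rfl).1 hnone'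
      · intro pre y post hsome
        rw [hdrop] at hsome
        simp only [pvSplitSZ] at hsome
        split at hsome
        · cases hsome
          rw [hrange]
          simp only [pvFindSZ]
          rw [hget, if_pos ‹(ap[j] : List Int).count 0 = 1›]
          simp
        · cases hs : pvSplitSZ (ap.drop (j + 1)) with
          | none => simp [hs] at hsome
          | some t =>
            obtain ⟨p', y', q'⟩ := t
            simp only [hs, Option.map_some] at hsome
            cases hsome
            rw [hrange]
            simp only [pvFindSZ]
            rw [hget, if_neg ‹¬ (ap[j] : List Int).count 0 = 1›]
            rw [(ih (ap.length - (j + 1)) (by omega) (j + 1) rfl).2 _ _ _ hs]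
            simp
            omega
    · have h1 : ap.drop j = [] := List.drop_eq_nil_of_le (by omega)
      have h2 : ap.length - j = 0 := by omega
      rw [h1, h2]
      exact ⟨fun _ => rfl, fun pre y post h => by simp [pvSplitSZ] at h⟩

theorem pvOuterA_spec (ap sel : List (List Int)) (i : Nat) :
    pvOuterA ap sel (List.range' i (ap.length - i)) = sel ++ pvSpec (ap.drop i) := by
  induction hN : ap.length - i using Nat.strong_induction_on generalizing ap sel i with
  | _ N ih =>
    subst hN
    by_cases hi : i < ap.length
    · have hdrop : ap.drop i = ap[i] :: ap.drop (i + 1) := List.drop_eq_getElem_cons hi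
      have hget : ap.getD i [] = ap[i] := List.getD_eq_getElem ap [] hi
      have hrange : List.range' i (ap.length - i) = i :: List.range' (i + 1) (ap.length - (i + 1)) := by
        have : ap.length - i = (ap.length - (i + 1)) + 1 := by omega
        rw [this, List.range'_succ]
      rw [hrange]
      by_cases h00 : ap[i] = [0, 0]
      · have hspec : pvSpec (ap.drop i) = pvSpec (ap.drop (i + 1)) := by
          rw [hdrop, h00, pvSpec_cons_00]
        simp only [pvOuterA]
        rw [hget, if_pos h00, ih (ap.length - (i + 1)) (by omega) ap sel (i + 1) rfl, hspec]
      · by_cases hsz : (ap[i] : List Int).count 0 = 1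
        · by_cases hlast : i < ap.length - 1
          · cases hs : pvSplitSZ (ap.drop (i + 1)) with
            | none =>
              have hspec : pvSpec (ap.drop i) = pvSpec (ap.drop (i + 1)) := by
                rw [hdrop, pvSpec_cons_sz_none h00 hsz hs]
              simp only [pvOuterA]
              rw [hget, if_neg h00, if_pos hsz, if_pos hlast,
                (pvFindSZ_of_split ap (i + 1)).1 hs,
                ih (ap.length - (i + 1)) (by omega) ap sel (i + 1) rfl, hspec]
            | some t =>
              obtain ⟨pre, y, post⟩ := t
              obtain ⟨heq, hpre, hy⟩ := pvSplitSZ_eq hs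
              have hfind := (pvFindSZ_of_split ap (i + 1)).2 pre y post hs
              have hnlt : i + 1 + pre.length < ap.length := by
                have := congrArg List.length heq
                simp at this
                omega
              have hgetn : ap.getD (i + 1 + pre.length) [] = y := by
                rw [List.getD_eq_getElem ap [] hnlt]
                have h1 : ap[i + 1 + pre.length] =
                    (ap.drop (i + 1))[pre.length]'(by rw [heq]; simp) := by
                  rw [List.getElem_drop]
                rw [h1]
                simp [heq]
              set ai2 := (if (ap[i] : List Int).getD 0 0 = 0 then
                  (ap[i] : List Int).set 0 ((ap[i] : List Int).getD 1 0) else ap[i]).set 1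
                  (if y.getD 1 0 = 0 then y.getD 0 0 else y.getD 1 0) with hai2
              have hmerge : ai2 = pvMergeB ap[i] y := rfl
              have hdrop' : ((ap.set i ai2).set (i + 1 + pre.length) [0, 0]).drop (i + 1) =
                  pre ++ [0, 0] :: post := by
                rw [← List.set_drop, List.drop_set_of_lt (by omega), heq]
                have h2 : (pre ++ y :: post).set pre.length [0, 0] =
                    pre ++ (y :: post).set 0 [0, 0] := by
                  rw [List.set_append_right _ _ (le_refl _)]
                  simp
                simpa using h2
              have hspec : pvSpec (ap.drop i) =
                  pvMergeB ap[i] y :: (pre.filter (fun l => l != [0, 0]) ++ pvSpec post) := by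
                rw [hdrop, pvSpec_cons_sz_some h00 hsz hs]
              have hlen' : ((ap.set i ai2).set (i + 1 + pre.length) [0, 0]).length = ap.length := by
                simp
              have hstep := ih (ap.length - (i + 1)) (by omega)
                ((ap.set i ai2).set (i + 1 + pre.length) [0, 0]) (sel ++ [ai2]) (i + 1)
                (by rw [hlen'])
              simp only [pvOuterA, hget, if_neg h00, if_pos hsz, if_pos hlast, hfind, hgetn]
              rw [← hai2, hstep, hdrop', pvSpec_noSZ hpre post, hspec, hmerge]
              simp
          · -- i is the last index: Python skips; after i there is nothing
            have hnil : ap.drop (i + 1) = [] := List.drop_eq_nil_of_le (by omega)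
            have hspec : pvSpec (ap.drop i) = pvSpec (ap.drop (i + 1)) := by
              rw [hdrop, pvSpec_cons_sz_none h00 hsz (by rw [hnil]; rfl)]
            simp only [pvOuterA]
            rw [hget, if_neg h00, if_pos hsz, if_neg hlast,
              ih (ap.length - (i + 1)) (by omega) ap sel (i + 1) rfl, hspec]
        · have hspec : pvSpec (ap.drop i) = ap[i] :: pvSpec (ap.drop (i + 1)) := by
            rw [hdrop, pvSpec_cons_other h00 hsz]
          simp only [pvOuterA]
          rw [hget, if_neg h00, if_neg hsz,
            ih (ap.length - (i + 1)) (by omega) ap (sel ++ [ap[i]]) (i + 1) rfl, hspec]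
          simp
    · have h1 : ap.drop i = [] := List.drop_eq_nil_of_le (by omega)
      have h2 : ap.length - i = 0 := by omega
      rw [h1, h2]
      simp [pvOuterA, pvSpec]

theorem JensA_eq_spec (apples : List (List Int)) : Jens_day41 apples = pvSpec apples := by
  have := pvOuterA_spec apples [] 0
  simpa [Jens_day41, List.range_eq_range'] using this

-- ===== B = pvSpec =====

-- run Source B's final pending fix-up
def pvFinishB (st : List (List Int) × Option (Nat × List Int)) : List (List Int) :=
  match st with
  | (out, none) => out
  | (out, some (idx, _)) => out.eraseIdx idx

-- what a waiting single-zero p with buffered pass-throughs v contributes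
def pvCont (p : List Int) (v xs : List (List Int)) : List (List Int) :=
  match pvSplitSZ xs with
  | none => v ++ xs.filter (fun l => l != [0, 0])
  | some (pre, y, post) =>
    pvMergeB p y :: ((v ++ pre.filter (fun l => l != [0, 0])) ++ pvSpec post)

theorem pvStepB_invariant (xs : List (List Int)) :
    (∀ out, pvFinishB (xs.foldl pvStepB (out, none)) = out ++ pvSpec xs) ∧
    (∀ u v p, pvFinishB (xs.foldl pvStepB (u ++ [] :: v, some (u.length, p))) =
      u ++ pvCont p v xs) := by
  induction xs with
  | nil =>
    constructor
    · intro out; simp [pvFinishB, pvSpec]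
    · intro u v p
      simp only [List.foldl_nil, pvFinishB]
      rw [List.eraseIdx_append_of_length_le (le_refl _)]
      simp [pvCont, pvSplitSZ]
  | cons x xs ih =>
    constructor
    · intro out
      by_cases hsz : x.count 0 = 1
      · have h00 : ¬ x = [0, 0] := by intro h; subst h; simp at hsz
        simp only [List.foldl_cons, pvStepB, if_pos hsz]
        have h2 := ih.2 out [] x
        rw [h2]
        congr 1
        cases hs : pvSplitSZ xs with
        | none =>
          rw [pvSpec_cons_sz_none h00 hsz hs, pvSpec_noSZ_all (pvSplitSZ_none hs)]
          simp [pvCont, hs]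
        | some t =>
          obtain ⟨pre, y, post⟩ := t
          rw [pvSpec_cons_sz_some h00 hsz hs]
          simp [pvCont, hs]
      · by_cases h00 : x = [0, 0]
        · subst h00
          simp only [List.foldl_cons, pvStepB, if_neg hsz, if_true]
          rw [ih.1 out, pvSpec_cons_00]
        · simp only [List.foldl_cons, pvStepB, if_neg hsz, if_neg h00]
          rw [ih.1 (out ++ [x]), pvSpec_cons_other h00 hsz]
          simp
    · intro u v p
      by_cases hsz : x.count 0 = 1
      · simp only [List.foldl_cons, pvStepB, if_pos hsz]
        have hset : (u ++ [] :: v).set u.length (pvMergeB p x) = u ++ pvMergeB p x :: v := by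
          rw [List.set_append_right _ _ (le_refl _)]
          simp
        rw [hset, ih.1 (u ++ pvMergeB p x :: v)]
        simp [pvCont, pvSplitSZ, hsz]
      · by_cases h00 : x = [0, 0]
        · simp only [List.foldl_cons, pvStepB, if_neg hsz, if_pos h00]
          rw [ih.2 u v p]
          congr 1
          subst h00
          simp only [pvCont, pvSplitSZ]
          rw [if_neg hsz]
          cases hs : pvSplitSZ xs with
          | none => simp [hs]
          | some t => obtain ⟨pre, y, post⟩ := t; simp [hs]
        · simp only [List.foldl_cons, pvStepB, if_neg hsz, if_neg h00]
          have hx : (u ++ [] :: v) ++ [x] = u ++ [] :: (v ++ [x]) := by simp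
          rw [hx, ih.2 u (v ++ [x]) p]
          congr 1
          simp only [pvCont, pvSplitSZ]
          rw [if_neg hsz]
          cases hs : pvSplitSZ xs with
          | none => simp [hs, h00]
          | some t => obtain ⟨pre, y, post⟩ := t; simp [h00]

theorem JensB_eq_spec (apples : List (List Int)) : Jens_day41_alt apples = pvSpec apples := by
  have h := (pvStepB_invariant apples).1 []
  have hdef : Jens_day41_alt apples = pvFinishB (apples.foldl pvStepB ([], none)) := by
    cases hfold : apples.foldl pvStepB ([], none) with
    | mk out pending => cases pending <;> simp [Jens_day41_alt, pvFinishB, hfold]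
  rw [hdef, h]
  simp

-- ===== VERDICT (by name: the statement is the Claim_ definition above) =====
theorem Jens_day41_spec : Claim_equal_Jens_day41 := by
  intro apples _ _
  unfold Spec_Jens_day41
  rw [JensA_eq_spec, JensB_eq_spec]
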